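-- pv_equiv track=rewrite | github.com/byam/predictEPL | utils/emolex.py | EmolexWords
-- ===== SOURCE A (Python) =====
-- def AppendEmolexWords(emolex_words, word, word_emolex):
--     for key in word_emolex.keys():
--         if word_emolex[key]:
--             emolex_words[key].append(word)
--
-- def EmolexWords(dic_emolex, dic_emolex_stemmed,
--                 words, words_stemmed):
--     # initialize emolex
--     emolex_words = {
--         'anger': [], 'fear': [], 'disgust': [], 'sadness': [],
--         'surprise': [],
--         'trust': [], 'joy': [], 'anticipation': [],
--         'positive': [], 'negative': [],
--     }
--
--     # count each word
--     for w_i in range(len(words)):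
--         word = words[w_i]
--         word_stem = words_stemmed[w_i]
--
--         # word in emolex
--         if word in dic_emolex:
--             if sum(list(dic_emolex[word].values())):
--                 AppendEmolexWords(emolex_words, word, dic_emolex[word])
--
--         # word_stem in emolex
--         elif word_stem in dic_emolex:
--             if sum(list(dic_emolex[word_stem].values())):
--                 AppendEmolexWords(emolex_words, word_stem, dic_emolex[word_stem])
--
--     return emolex_words
-- ===== SOURCE B (Python) =====
-- EMOLEX_CATEGORIES = ('anger', 'fear', 'disgust', 'sadness', 'surprise',
--                      'trust', 'joy', 'anticipation', 'positive', 'negative')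
--
--
-- def EmolexWords(dic_emolex, dic_emolex_stemmed, words, words_stemmed):
--     # Phase 1: pick the effective lexicon entry for each word, in order.
--     selected = []
--     for word, stem in zip(words, words_stemmed):
--         entry = dic_emolex.get(word)
--         if entry is None:
--             word, entry = stem, dic_emolex.get(stem)
--         if entry is not None and sum(entry.values()):
--             selected.append((word, entry))
--     # Phase 2: build each category bucket by one scan of the selection.
--     return {k: [w for w, e in selected if e.get(k)] for k in EMOLEX_CATEGORIES}
-- ===== Notes on version B (the rewrite author's own statement) =====
-- stated objective: alternative
-- what changed: Replaces A's index loop that mutates all ten buckets through a per-word helper by a two-phase pipeline: first select the effective (word, entry) pairs by zipping words with stems, then build each category bucket with one category-major comprehension over that selection.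
import Mathlib
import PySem

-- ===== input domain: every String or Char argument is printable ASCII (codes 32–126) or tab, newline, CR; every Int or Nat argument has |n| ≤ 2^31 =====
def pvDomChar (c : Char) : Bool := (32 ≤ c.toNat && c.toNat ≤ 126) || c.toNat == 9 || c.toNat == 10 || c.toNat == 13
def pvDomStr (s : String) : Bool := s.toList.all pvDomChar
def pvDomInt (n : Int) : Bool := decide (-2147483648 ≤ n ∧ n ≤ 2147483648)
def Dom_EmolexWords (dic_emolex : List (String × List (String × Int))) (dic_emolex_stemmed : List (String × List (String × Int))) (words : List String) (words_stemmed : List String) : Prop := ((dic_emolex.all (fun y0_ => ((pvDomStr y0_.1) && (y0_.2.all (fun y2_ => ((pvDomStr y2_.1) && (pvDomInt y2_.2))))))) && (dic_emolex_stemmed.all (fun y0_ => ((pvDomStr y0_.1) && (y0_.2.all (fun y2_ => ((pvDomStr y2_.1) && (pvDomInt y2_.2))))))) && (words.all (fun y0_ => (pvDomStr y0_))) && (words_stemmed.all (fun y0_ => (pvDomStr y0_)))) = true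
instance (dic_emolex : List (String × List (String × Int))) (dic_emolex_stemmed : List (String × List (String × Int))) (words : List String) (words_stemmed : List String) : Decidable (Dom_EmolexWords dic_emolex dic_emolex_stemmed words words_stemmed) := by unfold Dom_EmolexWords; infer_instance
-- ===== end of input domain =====

-- B rebuilds the result in two phases (select effective (word, entry) pairs, then one
-- category-major pass per bucket) instead of A's index loop mutating all ten buckets; alternative
-- decomposition, same asymptotic cost.


-- the ten emolex categories, in A's dict-literal order
def pvCats : List String :=
  ["anger", "fear", "disgust", "sadness", "surprise",
   "trust", "joy", "anticipation", "positive", "negative"]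

-- sum(list(d.values())) for an Int-valued dict
def pvSum (e : List (String × Int)) : Int := (e.map Prod.snd).sum

-- ===== PORT A =====
-- emolex_words[key].append(word): append to the first bucket named k.
-- Python raises KeyError when k is absent; there (outside Pre_) the dict is left unchanged.
def pvDictAppend : List (String × List String) → String → String → List (String × List String)
  | [], _, _ => []
  | p :: rest, k, w => if p.1 = k then (p.1, p.2 ++ [w]) :: rest else p :: pvDictAppend rest k w

-- AppendEmolexWords: for key in word_emolex.keys(): if word_emolex[key]: emolex_words[key].append(word)
def pvAppendEmolexWords (emolex : List (String × List String)) (word : String)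
    (entry : List (String × Int)) : List (String × List String) :=
  entry.foldl
    (fun em p => if (List.lookup p.1 entry).getD 0 ≠ 0 then pvDictAppend em p.1 word else em)
    emolex

-- A's loop body for one (word, word_stem) pair
def pvAStep (dic_emolex : List (String × List (String × Int)))
    (em : List (String × List String)) (wp : String × String) : List (String × List String) :=
  match List.lookup wp.1 dic_emolex with
  | some e => if pvSum e ≠ 0 then pvAppendEmolexWords em wp.1 e else em
  | none =>
    match List.lookup wp.2 dic_emolex with
    | some e => if pvSum e ≠ 0 then pvAppendEmolexWords em wp.2 e else em
    | none => em

def EmolexWords (dic_emolex : List (String × List (String × Int))) (dic_emolex_stemmed : List (String × List (String × Int))) (words : List String) (words_stemmed : List String) : List (String × List String) :=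
  (List.range words.length).foldl
    (fun em i =>
      match PySem.List.pyGet? words (Int.ofNat i), PySem.List.pyGet? words_stemmed (Int.ofNat i) with
      | some word, some word_stem => pvAStep dic_emolex em (word, word_stem)
      | _, _ => em)  -- words_stemmed[w_i] IndexError: outside Pre_, state left as is
    (pvCats.map (fun k => (k, ([] : List String))))

-- ===== PORT B =====
-- entry = dic_emolex.get(word); if entry is None: word, entry = stem, dic_emolex.get(stem)
def pvChoose (dic_emolex : List (String × List (String × Int))) (wp : String × String) :
    String × Option (List (String × Int)) :=
  match List.lookup wp.1 dic_emolex with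
  | some e => (wp.1, some e)
  | none => (wp.2, List.lookup wp.2 dic_emolex)

-- phase-1 loop body: if entry is not None and sum(entry.values()): selected.append((word, entry))
def pvBStep (dic_emolex : List (String × List (String × Int)))
    (acc : List (String × List (String × Int))) (wp : String × String) :
    List (String × List (String × Int)) :=
  match pvChoose dic_emolex wp with
  | (w, some e) => if pvSum e ≠ 0 then acc ++ [(w, e)] else acc
  | (_, none) => acc

-- [w for w, e in selected if e.get(k)]
def pvPick (k : String) (we : String × List (String × Int)) : Option String :=
  if (List.lookup k we.2).getD 0 ≠ 0 then some we.1 else none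

def EmolexWords_alt (dic_emolex : List (String × List (String × Int))) (dic_emolex_stemmed : List (String × List (String × Int))) (words : List String) (words_stemmed : List String) : List (String × List String) :=
  let selected := (words.zip words_stemmed).foldl (pvBStep dic_emolex) []
  pvCats.map (fun k => (k, selected.filterMap (pvPick k)))

-- ===== PRECONDITION & SPEC =====
def pvEntryOK (e : List (String × Int)) : Bool :=
  pvSum e == 0 || e.all (fun p => p.2 == 0 || pvCats.contains p.1)

def pvRowOK (dic_emolex : List (String × List (String × Int))) (wp : String × String) : Bool :=
  match List.lookup wp.1 dic_emolex with
  | some e => pvEntryOK e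
  | none =>
    match List.lookup wp.2 dic_emolex with
    | some e => pvEntryOK e
    | none => true

-- Exactly the inputs where Python A returns: words_stemmed at least as long as words (else
-- IndexError) and every selected entry with nonzero total has its nonzero-valued keys among the
-- ten categories (else KeyError).  The inner-Nodup conjunct only states that each entry is a
-- well-formed dict (a genuine Python dict cannot carry duplicate keys).
def Pre_EmolexWords (dic_emolex : List (String × List (String × Int))) (dic_emolex_stemmed : List (String × List (String × Int))) (words : List String) (words_stemmed : List String) : Prop :=
  words.length ≤ words_stemmed.length ∧
  (∀ p ∈ dic_emolex, (p.2.map Prod.fst).Nodup) ∧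
  (∀ wp ∈ words.zip words_stemmed, pvRowOK dic_emolex wp = true)
instance (dic_emolex : List (String × List (String × Int))) (dic_emolex_stemmed : List (String × List (String × Int))) (words : List String) (words_stemmed : List String) : Decidable (Pre_EmolexWords dic_emolex dic_emolex_stemmed words words_stemmed) := by unfold Pre_EmolexWords; infer_instance

def pvWitness_EmolexWords : (List (String × List (String × Int))) × (List (String × List (String × Int))) × List String × List String :=
  ([("good", [("joy", 1), ("positive", 1)]), ("bad", [("negative", 1)])], [], ["good", "bad", "so"], ["good", "bad", "so"])

def Spec_EmolexWords (dic_emolex : List (String × List (String × Int))) (dic_emolex_stemmed : List (String × List (String × Int))) (words : List String) (words_stemmed : List String) (out : List (String × List String)) : Prop := out = EmolexWords_alt dic_emolex dic_emolex_stemmed words words_stemmed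
instance (dic_emolex : List (String × List (String × Int))) (dic_emolex_stemmed : List (String × List (String × Int))) (words : List String) (words_stemmed : List String) (out : List (String × List String)) : Decidable (Spec_EmolexWords dic_emolex dic_emolex_stemmed words words_stemmed out) := by unfold Spec_EmolexWords; infer_instance

-- ===== CLAIM (what is proved, stated in full; the proofs are below) =====
def Claim_equal_EmolexWords : Prop := ∀ (dic_emolex : List (String × List (String × Int))) (dic_emolex_stemmed : List (String × List (String × Int))) (words : List String) (words_stemmed : List String), Dom_EmolexWords dic_emolex dic_emolex_stemmed words words_stemmed → Pre_EmolexWords dic_emolex dic_emolex_stemmed words words_stemmed → Spec_EmolexWords dic_emolex dic_emolex_stemmed words words_stemmed (EmolexWords dic_emolex dic_emolex_stemmed words words_stemmed)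

-- ===== LEMMAS AND PROOFS =====
-- B's phase-1 selection as a filterMap (proof-layer view of pvBStep's fold)
def pvSel (dic_emolex : List (String × List (String × Int))) (l : List (String × String)) :
    List (String × List (String × Int)) :=
  l.filterMap (fun wp =>
    match pvChoose dic_emolex wp with
    | (w, some e) => if pvSum e ≠ 0 then some (w, e) else none
    | (_, none) => none)

lemma lookup_mem {α : Type} (k : String) (v : α) :
    ∀ e : List (String × α), List.lookup k e = some v → (k, v) ∈ e
  | [], h => by simp at h
  | (pk, pv) :: rest, h => by
      by_cases hk : k = pk
      · subst hk
        simp [List.lookup] at h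
        subst h
        exact List.mem_cons_self ..
      · simp only [List.lookup, beq_eq_false_iff_ne.mpr hk] at h
        exact List.mem_cons_of_mem _ (lookup_mem k v rest h)

lemma lookup_of_mem_nodup {α : Type} :
    ∀ (e : List (String × α)) (p : String × α),
      (e.map Prod.fst).Nodup → p ∈ e → List.lookup p.1 e = some p.2
  | (qk, qv) :: rest, p, hnd, hp => by
      rw [List.map_cons, List.nodup_cons] at hnd
      rcases List.mem_cons.mp hp with h | h
      · subst h; simp [List.lookup]
      · have hne : p.1 ≠ qk := by
          intro hEq
          apply hnd.1
          have hx : p.1 ∈ rest.map Prod.fst := List.mem_map.mpr ⟨p, h, rfl⟩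
          rwa [hEq] at hx
        simp only [List.lookup, beq_eq_false_iff_ne.mpr hne]
        exact lookup_of_mem_nodup rest p hnd.2 h

lemma pvDictAppend_map :
    ∀ (l : List String) (g : String → List String) (c : String) (w : String),
      l.Nodup → c ∈ l →
      pvDictAppend (l.map fun k => (k, g k)) c w
        = l.map (fun k => (k, if k = c then g k ++ [w] else g k))
  | a :: t, g, c, w, hnd, hc => by
      rw [List.nodup_cons] at hnd
      by_cases hac : a = c
      · subst hac
        have htail : List.map (fun k => (k, g k)) t
            = List.map (fun k => (k, if k = a then g k ++ [w] else g k)) t := by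
          refine (List.map_congr_left fun k hk => ?_).symm
          have hne : k ≠ a := fun h => hnd.1 (h ▸ hk)
          simp [hne]
        simp [pvDictAppend, htail]
      · have hct : c ∈ t := by
          rcases List.mem_cons.mp hc with h | h
          · exact absurd h.symm hac
          · exact h
        simp only [List.map_cons, pvDictAppend, if_neg hac]
        rw [pvDictAppend_map t g c w hnd.2 hct]

lemma pvAppend_shape :
    ∀ (e : List (String × Int)) (entry : List (String × Int)) (w : String)
      (g : String → List String),
      (e.map Prod.fst).Nodup →
      (∀ p ∈ e, (List.lookup p.1 entry).getD 0 ≠ 0 → p.1 ∈ pvCats) →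
      e.foldl
        (fun em p => if (List.lookup p.1 entry).getD 0 ≠ 0 then pvDictAppend em p.1 w else em)
        (pvCats.map fun k => (k, g k))
      = pvCats.map (fun k => (k, g k ++
          if (e.any fun p => p.1 == k) ∧ (List.lookup k entry).getD 0 ≠ 0 then [w] else []))
  | [], entry, w, g, _, _ => by simp
  | p :: rest, entry, w, g, hnd, hsub => by
      rw [List.map_cons, List.nodup_cons] at hnd
      rw [List.foldl_cons]
      have hrest : ∀ q ∈ rest, (List.lookup q.1 entry).getD 0 ≠ 0 → q.1 ∈ pvCats :=
        fun q hq => hsub q (List.mem_cons_of_mem _ hq)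
      by_cases ht : (List.lookup p.1 entry).getD 0 ≠ 0
      · rw [if_pos ht, pvDictAppend_map pvCats g p.1 w (by decide) (hsub p List.mem_cons_self ht)]
        rw [pvAppend_shape rest entry w _ hnd.2 hrest]
        refine List.map_congr_left fun k hk => ?_
        by_cases hkp : k = p.1
        · subst hkp
          have hnone : (rest.any fun q => q.1 == p.1) = false := by
            rw [List.any_eq_false]
            intro q hq
            simp only [beq_iff_eq]
            intro hEq
            apply hnd.1
            have hx : q.1 ∈ rest.map Prod.fst := List.mem_map.mpr ⟨q, hq, rfl⟩
            rwa [hEq] at hx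
          simp [hnone, ht]
        · have hpk : (p.1 == k) = false := beq_eq_false_iff_ne.mpr (Ne.symm hkp)
          simp only [List.any_cons, hpk, Bool.false_or, if_neg hkp]
      · rw [if_neg ht]
        rw [pvAppend_shape rest entry w g hnd.2 hrest]
        refine List.map_congr_left fun k hk => ?_
        by_cases hkp : k = p.1
        · subst hkp
          have ht2 : (List.lookup p.1 entry).getD 0 = 0 := not_not.mp ht
          simp [ht2]
        · have hpk : (p.1 == k) = false := beq_eq_false_iff_ne.mpr (Ne.symm hkp)
          simp only [List.any_cons, hpk, Bool.false_or]

lemma pvAppendEmolex_shape (e : List (String × Int)) (w : String) (g : String → List String)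
    (hnd : (e.map Prod.fst).Nodup)
    (hok : pvEntryOK e = true) (hsum : pvSum e ≠ 0) :
    pvAppendEmolexWords (pvCats.map fun k => (k, g k)) w e
      = pvCats.map (fun k => (k, g k ++ if (List.lookup k e).getD 0 ≠ 0 then [w] else [])) := by
  have hall : ∀ p ∈ e, p.2 ≠ 0 → p.1 ∈ pvCats := by
    have : e.all (fun p => p.2 == 0 || pvCats.contains p.1) = true := by
      rcases Bool.or_eq_true_iff.mp hok with h | h
      · exact absurd (by exact_mod_cast beq_iff_eq.mp h) hsum
      · exact h
    intro p hp hpz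
    have := List.all_eq_true.mp this p hp
    rcases Bool.or_eq_true_iff.mp this with h | h
    · exact absurd (beq_iff_eq.mp h) hpz
    · exact List.mem_of_elem_eq_true h
  have hsub : ∀ p ∈ e, (List.lookup p.1 e).getD 0 ≠ 0 → p.1 ∈ pvCats := by
    intro p hp hl
    refine hall p hp ?_
    rw [lookup_of_mem_nodup e p hnd hp] at hl
    simpa using hl
  rw [pvAppendEmolexWords, pvAppend_shape e e w g hnd hsub]
  refine List.map_congr_left fun k hk => ?_
  by_cases hl : (List.lookup k e).getD 0 ≠ 0
  · have hsome : ∃ v, List.lookup k e = some v := by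
      cases h : List.lookup k e with
      | none => rw [h] at hl; simp at hl
      | some v => exact ⟨v, rfl⟩
    obtain ⟨v, hv⟩ := hsome
    have hmem : (k, v) ∈ e := lookup_mem k v e hv
    have hany : (e.any fun p => p.1 == k) = true :=
      List.any_eq_true.mpr ⟨(k, v), hmem, by simp⟩
    simp [hl, hany]
  · simp [hl]

lemma pvBfold (dic_emolex : List (String × List (String × Int))) :
    ∀ (l : List (String × String)) (acc : List (String × List (String × Int))),
    l.foldl (pvBStep dic_emolex) acc = acc ++ pvSel dic_emolex l
  | [], acc => by simp [pvSel]
  | wp :: rest, acc => by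
      rw [List.foldl_cons, pvBfold dic_emolex rest]
      cases hch : pvChoose dic_emolex wp with
      | mk w oe =>
        cases oe with
        | some e =>
          by_cases hs : pvSum e ≠ 0
          · simp [pvBStep, pvSel, hch, hs]
          · simp [pvBStep, pvSel, hch, hs]
        | none => simp [pvBStep, pvSel, hch]

lemma pvMain (dic_emolex : List (String × List (String × Int)))
    (hdic : ∀ p ∈ dic_emolex, (p.2.map Prod.fst).Nodup) :
    ∀ (l : List (String × String)) (g : String → List String),
    (∀ wp ∈ l, pvRowOK dic_emolex wp = true) →
    l.foldl (pvAStep dic_emolex) (pvCats.map fun k => (k, g k))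
      = pvCats.map (fun k => (k, g k ++ (pvSel dic_emolex l).filterMap (pvPick k))) := by
  intro l
  induction l with
  | nil => intro g _; simp [pvSel]
  | cons wp rest ih =>
    intro g hrow
    obtain ⟨w, s⟩ := wp
    have hhead := hrow (w, s) List.mem_cons_self
    have hrest : ∀ q ∈ rest, pvRowOK dic_emolex q = true :=
      fun q hq => hrow q (List.mem_cons_of_mem _ hq)
    rw [List.foldl_cons]
    cases hlw : List.lookup w dic_emolex with
    | some e =>
      have hok : pvEntryOK e = true := by simpa [pvRowOK, hlw] using hhead
      have hnd : (e.map Prod.fst).Nodup := hdic (w, e) (lookup_mem w e dic_emolex hlw)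
      by_cases hs : pvSum e ≠ 0
      · have hstep : pvAStep dic_emolex (pvCats.map fun k => (k, g k)) (w, s)
            = pvAppendEmolexWords (pvCats.map fun k => (k, g k)) w e := by
          simp [pvAStep, hlw, hs]
        rw [hstep, pvAppendEmolex_shape e w g hnd hok hs,
          ih (fun k => g k ++ if (List.lookup k e).getD 0 ≠ 0 then [w] else []) hrest]
        refine List.map_congr_left fun k hk => ?_
        have hselcons : pvSel dic_emolex ((w, s) :: rest)
            = (w, e) :: pvSel dic_emolex rest := by
          simp [pvSel, pvChoose, hlw, hs]
        rw [hselcons]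
        by_cases hl : (List.lookup k e).getD 0 ≠ 0
        · simp [pvPick, hl, List.append_assoc]
        · simp [pvPick, hl]
      · have hstep : pvAStep dic_emolex (pvCats.map fun k => (k, g k)) (w, s)
            = (pvCats.map fun k => (k, g k)) := by
          simp [pvAStep, hlw, hs]
        have hselcons : pvSel dic_emolex ((w, s) :: rest) = pvSel dic_emolex rest := by
          simp [pvSel, pvChoose, hlw, hs]
        rw [hstep, ih g hrest, hselcons]
    | none =>
      cases hls : List.lookup s dic_emolex with
      | some e =>
        have hok : pvEntryOK e = true := by simpa [pvRowOK, hlw, hls] using hhead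
        have hnd : (e.map Prod.fst).Nodup := hdic (s, e) (lookup_mem s e dic_emolex hls)
        by_cases hs : pvSum e ≠ 0
        · have hstep : pvAStep dic_emolex (pvCats.map fun k => (k, g k)) (w, s)
              = pvAppendEmolexWords (pvCats.map fun k => (k, g k)) s e := by
            simp [pvAStep, hlw, hls, hs]
          rw [hstep, pvAppendEmolex_shape e s g hnd hok hs,
            ih (fun k => g k ++ if (List.lookup k e).getD 0 ≠ 0 then [s] else []) hrest]
          refine List.map_congr_left fun k hk => ?_
          have hselcons : pvSel dic_emolex ((w, s) :: rest)
              = (s, e) :: pvSel dic_emolex rest := by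
            simp [pvSel, pvChoose, hlw, hls, hs]
          rw [hselcons]
          by_cases hl : (List.lookup k e).getD 0 ≠ 0
          · simp [pvPick, hl, List.append_assoc]
          · simp [pvPick, hl]
        · have hstep : pvAStep dic_emolex (pvCats.map fun k => (k, g k)) (w, s)
              = (pvCats.map fun k => (k, g k)) := by
            simp [pvAStep, hlw, hls, hs]
          have hselcons : pvSel dic_emolex ((w, s) :: rest) = pvSel dic_emolex rest := by
            simp [pvSel, pvChoose, hlw, hls, hs]
          rw [hstep, ih g hrest, hselcons]
      | none =>
        have hstep : pvAStep dic_emolex (pvCats.map fun k => (k, g k)) (w, s)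
            = (pvCats.map fun k => (k, g k)) := by
          simp [pvAStep, hlw, hls]
        have hselcons : pvSel dic_emolex ((w, s) :: rest) = pvSel dic_emolex rest := by
          simp [pvSel, pvChoose, hlw, hls]
        rw [hstep, ih g hrest, hselcons]

lemma pvAfold_range (dic_emolex : List (String × List (String × Int))) :
    ∀ (words words_stemmed : List String), words.length ≤ words_stemmed.length →
    ∀ (em : List (String × List String)),
    (List.range words.length).foldl
      (fun em i =>
        match PySem.List.pyGet? words (Int.ofNat i), PySem.List.pyGet? words_stemmed (Int.ofNat i) with
        | some word, some word_stem => pvAStep dic_emolex em (word, word_stem)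
        | _, _ => em) em
      = (words.zip words_stemmed).foldl (pvAStep dic_emolex) em := by
  intro words
  induction words with
  | nil => intro ss h em; simp
  | cons w ws ih =>
    intro ss h em
    cases ss with
    | nil => simp at h
    | cons s ss' =>
      have ih2 := ih ss' (by simpa using h) (pvAStep dic_emolex em (w, s))
      rw [List.length_cons, List.range_succ_eq_map, List.foldl_cons, List.foldl_map]
      rw [List.zip_cons_cons, List.foldl_cons]
      simp only [Int.ofNat_eq_natCast, PySem.List.pyGet?_natCast, Nat.succ_eq_add_one,
        List.getElem?_cons_zero, List.getElem?_cons_succ] at ih2 ⊢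
      exact ih2

-- ===== VERDICT (by name: the statement is the Claim_ definition above) =====
theorem EmolexWords_spec : Claim_equal_EmolexWords := by
  intro dic_emolex dic_emolex_stemmed words words_stemmed hdom hpre
  obtain ⟨hlen, hnd, hrow⟩ := hpre
  show EmolexWords dic_emolex dic_emolex_stemmed words words_stemmed
      = EmolexWords_alt dic_emolex dic_emolex_stemmed words words_stemmed
  rw [EmolexWords, EmolexWords_alt]
  rw [pvAfold_range dic_emolex words words_stemmed hlen]
  rw [show (pvCats.map fun k => (k, ([] : List String)))
        = pvCats.map (fun k => (k, (fun _ => ([] : List String)) k)) from rfl]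
  rw [pvMain dic_emolex hnd (words.zip words_stemmed) (fun _ => []) hrow]
  rw [pvBfold dic_emolex (words.zip words_stemmed) []]
  simp
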